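-- pv_equiv track=rewrite | github.com/Maple30/Python_Mutationtest_Project | mutation_guitool/functions.py | logic_symbols_check
-- ===== SOURCE A (Python) =====
-- def get_index(string=None, item=''):
--     flag = 0
--     all_index = []
--
--     for value in string:
--         if string.find(item,flag) != -1:
--            all_index.append(string.find(item,flag))
--            flag =  string.find(item,flag) + 1
--         else:
--             break
--     return all_index
--
-- def logic_symbols_check(origin=""):
--     logic_symbols = ("and","or") #邏輯符號
--     lo_rs_symbols = list(logic_symbols)
--     mutations = []
--     for i,symbol in enumerate(logic_symbols): #檢查邏輯符號
--         if symbol in origin: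
--             all_willberp_index = get_index(origin, symbol) #獲取相符的所有索引
--             del lo_rs_symbols[i] #把不必變異的符號刪除
--             for index in all_willberp_index:
--                 if symbol == "and":
--                     for rpsym in lo_rs_symbols:
--                         mutations.append(origin[:index] + rpsym + origin[(index+3):])
--                 elif symbol == "or":
--                     for rpsym in lo_rs_symbols:
--                         mutations.append(origin[:index] + rpsym + origin[(index+2):])
--             lo_rs_symbols = list(logic_symbols)
--     return mutations
-- ===== SOURCE B (Python) =====
-- def logic_symbols_check(origin=""):
--     and_idx = []
--     or_idx = []
--     for i in range(len(origin)):
--         if origin[i:i+3] == "and":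
--             and_idx.append(i)
--         elif origin[i:i+2] == "or":
--             or_idx.append(i)
--     mutations = [origin[:i] + "or" + origin[i+3:] for i in and_idx]
--     mutations += [origin[:i] + "and" + origin[i+2:] for i in or_idx]
--     return mutations
-- ===== Notes on version B (the rewrite author's own statement) =====
-- stated objective: simpler
-- what changed: Replaces A's per-symbol find-based scans (the get_index helper with repeated str.find and the delete/restore of the symbol list) with a single classifying pass over every index that collects the occurrence positions of both logic operators, followed by two plain emission loops.
import Mathlib
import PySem

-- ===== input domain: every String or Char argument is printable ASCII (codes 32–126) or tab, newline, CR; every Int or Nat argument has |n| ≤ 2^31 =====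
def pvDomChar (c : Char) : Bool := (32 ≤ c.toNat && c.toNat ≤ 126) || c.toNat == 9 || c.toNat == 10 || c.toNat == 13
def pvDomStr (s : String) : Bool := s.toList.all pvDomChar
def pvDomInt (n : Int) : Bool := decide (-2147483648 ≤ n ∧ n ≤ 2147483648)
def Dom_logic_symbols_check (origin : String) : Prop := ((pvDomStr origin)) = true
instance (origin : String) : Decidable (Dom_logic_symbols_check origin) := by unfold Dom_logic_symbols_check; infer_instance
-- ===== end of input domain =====

-- B replaces A's two find-based scans (get_index) with one classifying pass over every index
-- followed by two emission loops; same return value on every input (objective: simpler).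

-- ===== PORT A =====
-- get_index's 'for value in string' loop: the fuel list is the string's chars, 'break' = stop.
def pvGetIndexLoop (s item : List Char) : List Char → Int → List Int → List Int
  | [], _, acc => acc
  | _ :: rest, flag, acc =>
    let f := PySem.Chars.findFrom s item flag
    if f ≠ -1 then pvGetIndexLoop s item rest (f + 1) (acc ++ [f]) else acc

def pvGetIndex (s item : List Char) : List Int := pvGetIndexLoop s item s 0 []

-- strings handled as char lists (PySem convention), String.ofList only at the very end;
-- enumerate(logic_symbols) over the literal pair is the literal list [(«and»,0),(«or»,1)]
def logic_symbols_check (origin : String) : List String :=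
  let s := origin.toList
  let logic_symbols : List (List Char) := [['a','n','d'], ['o','r']]
  let muts :=
    [((['a','n','d'] : List Char), (0 : Nat)), (['o','r'], 1)].foldl
      (fun (mutations : List (List Char)) p =>
        let symbol := p.1
        let i := p.2
        if PySem.Chars.isIn symbol s then
          let all_willberp_index := pvGetIndex s symbol
          let lo_rs_symbols := logic_symbols.eraseIdx i  -- del lo_rs_symbols[i]
          all_willberp_index.foldl (fun acc index =>
            if symbol = ['a','n','d'] then
              lo_rs_symbols.foldl (fun acc2 rpsym =>
                acc2 ++ [PySem.List.slice s none (some index) ++ rpsym ++ PySem.List.slice s (some (index + 3)) none]) acc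
            else if symbol = ['o','r'] then
              lo_rs_symbols.foldl (fun acc2 rpsym =>
                acc2 ++ [PySem.List.slice s none (some index) ++ rpsym ++ PySem.List.slice s (some (index + 2)) none]) acc
            else acc) mutations
        else mutations) []
  muts.map String.ofList

-- ===== PORT B =====
def logic_symbols_check_alt (origin : String) : List String :=
  let s := origin.toList
  let classified :=
    (PySem.List.pyRange 0 s.length 1).foldl (fun (p : List Int × List Int) i =>
      if PySem.List.slice s (some i) (some (i + 3)) = ['a','n','d'] then (p.1 ++ [i], p.2)
      else if PySem.List.slice s (some i) (some (i + 2)) = ['o','r'] then (p.1, p.2 ++ [i])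
      else p) ([], [])
  let muts :=
    classified.1.map (fun i =>
      PySem.List.slice s none (some i) ++ ['o','r'] ++ PySem.List.slice s (some (i + 3)) none)
    ++ classified.2.map (fun i =>
      PySem.List.slice s none (some i) ++ ['a','n','d'] ++ PySem.List.slice s (some (i + 2)) none)
  muts.map String.ofList

-- ===== PRECONDITION & SPEC =====
def Spec_logic_symbols_check (origin : String) (out : List String) : Prop := out = logic_symbols_check_alt origin
instance (origin : String) (out : List String) : Decidable (Spec_logic_symbols_check origin out) := by unfold Spec_logic_symbols_check; infer_instance

-- ===== CLAIM (what is proved, stated in full; the proofs are below) =====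
def Claim_equal_logic_symbols_check : Prop := ∀ (origin : String), Dom_logic_symbols_check origin → Spec_logic_symbols_check origin (logic_symbols_check origin)

-- ===== LEMMAS AND PROOFS =====

-- the occurrence positions of `item` in `s`, in increasing order
def pvOcc (s item : List Char) : List Nat :=
  (List.range s.length).filter (fun j => decide (item <+: s.drop j))

theorem pvOcc_pairwise (s item : List Char) : (pvOcc s item).Pairwise (· < ·) :=
  List.pairwise_lt_range.filter _

theorem pvOcc_mem_iff (s item : List Char) (hne : item ≠ []) (j : Nat) :
    j ∈ pvOcc s item ↔ item <+: s.drop j := by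
  unfold pvOcc
  simp only [List.mem_filter, List.mem_range, decide_eq_true_eq]
  constructor
  · exact fun h => h.2
  · intro h
    refine ⟨?_, h⟩
    by_contra hc
    push_neg at hc
    rw [List.drop_eq_nil_iff.mpr (by omega)] at h
    exact hne (List.prefix_nil.mp h)

theorem pvFilter_ge_cons (l : List Nat) (hl : l.Pairwise (· < ·)) (k m : Nat)
    (hm : m ∈ l) (hkm : k ≤ m) (hmin : ∀ j ∈ l, k ≤ j → m ≤ j) :
    l.filter (fun j => decide (k ≤ j)) = m :: l.filter (fun j => decide (m + 1 ≤ j)) := by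
  induction l with
  | nil => cases hm
  | cons a t ih =>
    rw [List.pairwise_cons] at hl
    obtain ⟨hat, hpt⟩ := hl
    by_cases hka : k ≤ a
    · have ham : a = m := by
        rcases List.mem_cons.mp hm with h | h
        · exact h.symm
        · have h1 := hat m h
          have h2 := hmin a (List.mem_cons_self) hka
          omega
      subst ham
      rw [List.filter_cons_of_pos (by simpa using hka),
          List.filter_cons_of_neg (by simp)]
      congr 1
      apply List.filter_congr
      intro j hj
      have := hat j hj
      simp only [decide_eq_decide]
      omega
    · have hmt : m ∈ t := by
        rcases List.mem_cons.mp hm with h | h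
        · subst h; exact absurd hkm hka
        · exact h
      rw [List.filter_cons_of_neg (by simpa using hka),
          List.filter_cons_of_neg (by simp only [decide_eq_true_eq]; omega)]
      exact ih hpt hmt (fun j hj hkj => hmin j (List.mem_cons_of_mem _ hj) hkj)

theorem pvLoop_eq (s item : List Char) (hne : item ≠ []) :
    ∀ (fuel : List Char) (k : Nat) (acc : List Int), k ≤ s.length →
      ((pvOcc s item).filter (fun j => decide (k ≤ j))).length ≤ fuel.length →
      pvGetIndexLoop s item fuel (k : Int) acc
        = acc ++ ((pvOcc s item).filter (fun j => decide (k ≤ j))).map (Nat.cast : Nat → Int) := by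
  intro fuel
  induction fuel with
  | nil =>
    intro k acc hk hlen
    have h0 : (pvOcc s item).filter (fun j => decide (k ≤ j)) = [] := by
      rw [← List.length_eq_zero_iff]
      simpa using hlen
    simp [pvGetIndexLoop, h0]
  | cons c rest ih =>
    intro k acc hk hlen
    simp only [pvGetIndexLoop]
    by_cases hf : PySem.Chars.findFrom s item (k : Int) = -1
    · rw [if_neg (by simp [hf])]
      have hnin : ¬ item <:+: List.drop k s :=
        (PySem.Chars.findFrom_natCast_eq_neg_one_iff s item k hk).mp hf
      have h0 : (pvOcc s item).filter (fun j => decide (k ≤ j)) = [] := by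
        rw [List.filter_eq_nil_iff]
        intro j hj hdec
        have hkj : k ≤ j := by simpa using hdec
        have hpre : item <+: List.drop j s := (pvOcc_mem_iff s item hne j).mp hj
        have hdj : List.drop j s = List.drop (j - k) (List.drop k s) := by
          rw [List.drop_drop]; congr 1; omega
        rw [hdj] at hpre
        exact hnin (hpre.isInfix.trans (List.drop_suffix _ _).isInfix)
      simp [h0]
    · rw [if_pos (by simp [hf])]
      obtain ⟨hkf, hpre, hnone⟩ := PySem.Chars.findFrom_natCast_spec s item k hk hf
      have hf0 : (0 : Int) ≤ PySem.Chars.findFrom s item (k : Int) :=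
        le_trans (by exact_mod_cast Nat.zero_le k) hkf
      have hfm : PySem.Chars.findFrom s item (k : Int)
          = ((PySem.Chars.findFrom s item (k : Int)).toNat : Int) :=
        (Int.toNat_of_nonneg hf0).symm
      set m := (PySem.Chars.findFrom s item (k : Int)).toNat with hmdef
      have hmlt : m < s.length := by
        by_contra hc
        push_neg at hc
        rw [List.drop_eq_nil_iff.mpr (by omega)] at hpre
        exact hne (List.prefix_nil.mp hpre)
      have hkm : k ≤ m := by
        rw [hfm] at hkf
        exact_mod_cast hkf
      have hmem : m ∈ pvOcc s item := (pvOcc_mem_iff s item hne m).mpr hpre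
      have hminm : ∀ j ∈ pvOcc s item, k ≤ j → m ≤ j := by
        intro j hj hkj
        by_contra hc
        push_neg at hc
        exact hnone j hkj hc ((pvOcc_mem_iff s item hne j).mp hj)
      have hcons := pvFilter_ge_cons (pvOcc s item) (pvOcc_pairwise s item) k m hmem hkm hminm
      rw [hcons]
      have hlen' : ((pvOcc s item).filter (fun j => decide (m + 1 ≤ j))).length ≤ rest.length := by
        rw [hcons] at hlen
        simpa using hlen
      have hih := ih (m + 1) (acc ++ [((m : Nat) : Int)]) (by omega) hlen'
      rw [hfm]
      rw [show ((m : Int) + 1) = (((m + 1 : Nat) : Nat) : Int) by push_cast; ring]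
      rw [hih]
      simp

theorem pvGetIndex_eq (s item : List Char) (hne : item ≠ []) :
    pvGetIndex s item = (pvOcc s item).map (Nat.cast : Nat → Int) := by
  unfold pvGetIndex
  have hfull : (pvOcc s item).filter (fun j => decide (0 ≤ j)) = pvOcc s item :=
    List.filter_eq_self.mpr (by intro j _; simp)
  have hlen : ((pvOcc s item).filter (fun j => decide (0 ≤ j))).length ≤ s.length := by
    rw [hfull]
    exact le_trans (List.length_filter_le _ _) (by simp [pvOcc])
  have := pvLoop_eq s item hne s 0 [] (Nat.zero_le _) hlen
  simpa [hfull] using this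

theorem pvOcc_nil_of_not_isIn (s item : List Char)
    (h : PySem.Chars.isIn item s = false) : pvOcc s item = [] := by
  unfold pvOcc
  rw [List.filter_eq_nil_iff]
  intro j _ hp
  have hex : ∃ j, item <+: List.drop j s := ⟨j, by simpa using hp⟩
  rw [PySem.Chars.exists_prefix_drop_iff_isIn] at hex
  simp [h] at hex

-- B's classifying fold, in closed form
theorem pvClassify_eq (s : List Char) (l : List Int) (p : List Int × List Int) :
    l.foldl (fun (p : List Int × List Int) i =>
      if PySem.List.slice s (some i) (some (i + 3)) = ['a','n','d'] then (p.1 ++ [i], p.2)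
      else if PySem.List.slice s (some i) (some (i + 2)) = ['o','r'] then (p.1, p.2 ++ [i])
      else p) p
    = (p.1 ++ l.filter (fun i => decide (PySem.List.slice s (some i) (some (i + 3)) = ['a','n','d'])),
       p.2 ++ l.filter (fun i => decide (¬ PySem.List.slice s (some i) (some (i + 3)) = ['a','n','d']
                                  ∧ PySem.List.slice s (some i) (some (i + 2)) = ['o','r']))) := by
  induction l generalizing p with
  | nil => simp
  | cons i t ih =>
    simp only [List.foldl_cons]
    by_cases h1 : PySem.List.slice s (some i) (some (i + 3)) = ['a','n','d']
    · rw [if_pos h1, ih]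
      simp [List.filter_cons, h1]
    · rw [if_neg h1]
      by_cases h2 : PySem.List.slice s (some i) (some (i + 2)) = ['o','r']
      · rw [if_pos h2, ih]
        simp [List.filter_cons, h1, h2]
      · rw [if_neg h2, ih]
        simp [List.filter_cons, h1, h2]

-- slice with a nat lower bound and literal width, as take/drop
theorem pvSlice3 (s : List Char) (j : Nat) :
    PySem.List.slice s (some (j : Int)) (some ((j : Int) + 3)) = (s.drop j).take 3 := by
  rw [show ((j : Int) + 3) = ((j : Int) + ((3 : Nat) : Int)) by norm_num]
  exact PySem.List.slice_natCast_add s j 3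

theorem pvSlice2 (s : List Char) (j : Nat) :
    PySem.List.slice s (some (j : Int)) (some ((j : Int) + 2)) = (s.drop j).take 2 := by
  rw [show ((j : Int) + 2) = ((j : Int) + ((2 : Nat) : Int)) by norm_num]
  exact PySem.List.slice_natCast_add s j 2

theorem pvTakeA (s : List Char) (j : Nat) :
    (s.drop j).take 3 = ['a','n','d'] ↔ ['a','n','d'] <+: s.drop j := by
  rw [List.prefix_iff_eq_take]
  exact eq_comm

theorem pvTakeO (s : List Char) (j : Nat) :
    (s.drop j).take 2 = ['o','r'] ↔ ['o','r'] <+: s.drop j := by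
  rw [List.prefix_iff_eq_take]
  exact eq_comm

-- the two classifying filters ARE the occurrence lists
theorem pvFilterA (s : List Char) :
    (List.range s.length).filter
        ((fun i => decide (PySem.List.slice s (some i) (some (i + 3)) = ['a','n','d']))
          ∘ (fun k : Nat => (k : Int)))
      = pvOcc s ['a','n','d'] := by
  unfold pvOcc
  apply List.filter_congr
  intro j _
  simp only [Function.comp, decide_eq_decide]
  rw [pvSlice3]
  exact pvTakeA s j

theorem pvFilterO (s : List Char) :
    (List.range s.length).filter
        ((fun i => decide (¬ PySem.List.slice s (some i) (some (i + 3)) = ['a','n','d']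
                    ∧ PySem.List.slice s (some i) (some (i + 2)) = ['o','r']))
          ∘ (fun k : Nat => (k : Int)))
      = pvOcc s ['o','r'] := by
  unfold pvOcc
  apply List.filter_congr
  intro j _
  simp only [Function.comp, decide_eq_decide]
  rw [pvSlice3, pvSlice2]
  constructor
  · intro h
    exact (pvTakeO s j).mp h.2
  · intro h
    refine ⟨?_, (pvTakeO s j).mpr h⟩
    intro hA
    have h2 : (s.drop j).take 2 = ['a','n'] := by
      have := List.take_take (i := 2) (j := 3) (l := s.drop j)
      simp only [show min 2 3 = 2 by norm_num] at this
      rw [← this, hA]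
      rfl
    rw [(pvTakeO s j).mpr h] at h2
    exact absurd h2 (by decide)

theorem pvFlattenSingleton {α β : Type} (f : α → β) (l : List α) :
    (l.map (fun x => [f x])).flatten = l.map f := by
  induction l with
  | nil => rfl
  | cons a t ih => simp [ih]

-- ===== VERDICT (by name: the statement is the Claim_ definition above) =====
theorem logic_symbols_check_spec : Claim_equal_logic_symbols_check := by
  unfold Claim_equal_logic_symbols_check Spec_logic_symbols_check
  intro origin _
  unfold logic_symbols_check logic_symbols_check_alt
  dsimp only []
  rw [pvClassify_eq]
  simp only [List.nil_append]
  rw [show ((origin.toList.length : Int)) = ((origin.toList.length : Nat) : Int) from rfl,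
      PySem.List.pyRange_zero_natCast, List.filter_map, List.filter_map, pvFilterA, pvFilterO]
  simp only [List.foldl_cons, List.foldl_nil]
  by_cases hand : PySem.Chars.isIn ['a','n','d'] origin.toList <;>
    by_cases hor : PySem.Chars.isIn ['o','r'] origin.toList
  · rw [if_pos hand, if_pos hor, pvGetIndex_eq origin.toList ['a','n','d'] (by decide),
        pvGetIndex_eq origin.toList ['o','r'] (by decide)]
    simp [List.eraseIdx, PySem.List.foldl_append_singleton_eq_map, Function.comp_def, pvFlattenSingleton]
  · rw [if_pos hand, if_neg hor, pvGetIndex_eq origin.toList ['a','n','d'] (by decide),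
        pvOcc_nil_of_not_isIn origin.toList ['o','r'] (by simpa using hor)]
    simp [List.eraseIdx, PySem.List.foldl_append_singleton_eq_map, Function.comp_def, pvFlattenSingleton]
  · rw [if_neg hand, if_pos hor, pvGetIndex_eq origin.toList ['o','r'] (by decide),
        pvOcc_nil_of_not_isIn origin.toList ['a','n','d'] (by simpa using hand)]
    simp [List.eraseIdx, PySem.List.foldl_append_singleton_eq_map, Function.comp_def, pvFlattenSingleton]
  · rw [if_neg hand, if_neg hor,
        pvOcc_nil_of_not_isIn origin.toList ['a','n','d'] (by simpa using hand),
        pvOcc_nil_of_not_isIn origin.toList ['o','r'] (by simpa using hor)]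
    simp
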